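-- pv_equiv track=rewrite | github.com/GayDev/Python | max.py | find_maxes
-- ===== SOURCE A (Python) =====
-- def find_maxes(a,c=1):
--     mx = [0]*c
--     for i in a:
--         for j in range(c):
--             if i > mx[j]:
--                 for k in range(1,c-j):
--                     mx[-k] = mx[-k-1]
--                 mx[j] = i
--                 break
--     return mx
-- ===== SOURCE B (Python) =====
-- def find_maxes(a, c=1):
--     n = max(c, 0)
--     return sorted(list(a) + [0] * n, reverse=True)[:n]
-- ===== Notes on version B (the rewrite author's own statement) =====
-- stated objective: simpler
-- what changed: A maintains a top-c buffer with a per-element scan plus manual shift-and-insert writes; B builds one pool of a plus c baseline zeros, sorts it descending and slices the first c elements.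
import Mathlib
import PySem

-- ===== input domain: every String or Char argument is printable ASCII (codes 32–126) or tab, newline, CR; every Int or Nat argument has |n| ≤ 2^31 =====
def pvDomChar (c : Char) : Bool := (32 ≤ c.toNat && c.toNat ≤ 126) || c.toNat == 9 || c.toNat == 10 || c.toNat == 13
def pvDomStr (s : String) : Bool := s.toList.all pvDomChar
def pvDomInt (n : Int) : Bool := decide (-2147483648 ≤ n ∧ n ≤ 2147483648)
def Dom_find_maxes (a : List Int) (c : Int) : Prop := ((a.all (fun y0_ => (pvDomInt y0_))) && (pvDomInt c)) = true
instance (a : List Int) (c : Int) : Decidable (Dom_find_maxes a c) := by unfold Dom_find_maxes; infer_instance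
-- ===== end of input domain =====

-- B replaces A's per-element scan-and-shift insertion with sort-descending-then-slice (objective: simpler).

-- ===== PORT A =====
-- list assignment xs[i] = v (Python index semantics; the unreachable out-of-range case leaves xs)
def pySet (xs : List Int) (i : Int) (v : Int) : List Int :=
  match PySem.List.pyIdx? xs.length i with
  | some k => xs.set k v
  | none => xs

-- 'for k in range(1, c-j): mx[-k] = mx[-k-1]'
def shiftA (c j : Int) (mx : List Int) : List Int :=
  (PySem.List.pyRange 1 (c - j)).foldl
    (fun m k => pySet m (-k) ((PySem.List.pyGet? m (-k - 1)).getD 0)) mx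

-- 'for j in range(c): if i > mx[j]: <shift>; mx[j] = i; break'
def scanA (c i : Int) (mx : List Int) : List Int → List Int
  | [] => mx
  | j :: rest =>
      if (PySem.List.pyGet? mx j).getD 0 < i then
        pySet (shiftA c j mx) j i
      else scanA c i mx rest

def find_maxes (a : List Int) (c : Int) : List Int :=
  a.foldl (fun mx i => scanA c i mx (PySem.List.pyRange 0 c)) (PySem.List.pyRepeat [0] c)

-- ===== PORT B =====
def find_maxes_alt (a : List Int) (c : Int) : List Int :=
  let n := max c 0
  PySem.List.slice (PySem.List.sorted (a ++ PySem.List.pyRepeat [0] n) (fun x => x) true)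
    none (some n)

-- ===== PRECONDITION & SPEC =====
def Spec_find_maxes (a : List Int) (c : Int) (out : List Int) : Prop := out = find_maxes_alt a c
instance (a : List Int) (c : Int) (out : List Int) : Decidable (Spec_find_maxes a c out) := by unfold Spec_find_maxes; infer_instance

-- ===== CLAIM (what is proved, stated in full; the proofs are below) =====
def Claim_equal_find_maxes : Prop := ∀ (a : List Int) (c : Int), Dom_find_maxes a c → Spec_find_maxes a c (find_maxes a c)

-- ===== LEMMAS AND PROOFS =====

-- descending insertion (the effect of A's inner scan), proof-side only
def insD (i : Int) : List Int → List Int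
  | [] => [i]
  | x :: xs => if x < i then i :: x :: xs else x :: insD i xs

lemma insD_length (i : Int) (l : List Int) : (insD i l).length = l.length + 1 := by
  induction l with
  | nil => simp [insD]
  | cons x xs ih => by_cases h : x < i <;> simp [insD, h, ih]

lemma mem_insD {y i : Int} {l : List Int} : y ∈ insD i l ↔ y = i ∨ y ∈ l := by
  induction l with
  | nil => simp [insD]
  | cons x xs ih =>
    by_cases h : x < i
    · simp [insD, h]
    · simp [insD, h, ih]
      tauto

lemma insD_perm (i : Int) (l : List Int) : (insD i l).Perm (i :: l) := by
  induction l with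
  | nil => simp [insD]
  | cons x xs ih =>
    by_cases h : x < i
    · simp [insD, h]
    · simp only [insD, if_neg h]
      exact (ih.cons x).trans (List.Perm.swap i x xs)

lemma insD_pairwise (i : Int) (l : List Int) (h : l.Pairwise (fun a b => b ≤ a)) :
    (insD i l).Pairwise (fun a b => b ≤ a) := by
  induction l with
  | nil => simp [insD]
  | cons x xs ih =>
    rw [List.pairwise_cons] at h
    obtain ⟨h1, h2⟩ := h
    by_cases hx : x < i
    · simp only [insD, if_pos hx]
      rw [List.pairwise_cons]
      refine ⟨?_, ?_⟩
      · intro y hy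
        rcases List.mem_cons.mp hy with rfl | hy
        · exact le_of_lt hx
        · exact (h1 y hy).trans (le_of_lt hx)
      · rw [List.pairwise_cons]; exact ⟨h1, h2⟩
    · simp only [insD, if_neg hx]
      rw [List.pairwise_cons]
      refine ⟨?_, ih h2⟩
      intro y hy
      rcases mem_insD.mp hy with rfl | hy
      · omega
      · exact h1 y hy

lemma take_insD_take (i : Int) : ∀ (l : List Int) (n : Nat), n ≤ l.length →
    (insD i (l.take n)).take n = (insD i l).take n := by
  intro l
  induction l with
  | nil => intro n h; simp_all
  | cons x xs ih =>
    intro n h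
    match n with
    | 0 => simp
    | Nat.succ m =>
      simp only [List.take_succ_cons]
      by_cases hx : x < i
      · simp only [insD, if_pos hx, List.take_succ_cons]
        congr 1
        cases m with
        | zero => simp
        | succ p =>
          simp only [List.take_succ_cons]
          congr 1
          rw [List.take_take]
          congr 1
          omega
      · simp only [insD, if_neg hx, List.take_succ_cons]
        congr 1
        exact ih m (by simp at h; omega)

lemma foldl_insD_take (n : Nat) : ∀ (a s : List Int), n ≤ s.length →
    a.foldl (fun mx i => (insD i mx).take n) (s.take n)
      = (a.foldl (fun t i => insD i t) s).take n := by
  intro a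
  induction a with
  | nil => intro s h; simp
  | cons x xs ih =>
    intro s h
    simp only [List.foldl_cons]
    rw [take_insD_take x s n h]
    exact ih (insD x s) (by rw [insD_length]; omega)

lemma foldl_insD_perm : ∀ (a s : List Int),
    (a.foldl (fun t i => insD i t) s).Perm (s ++ a) := by
  intro a
  induction a with
  | nil => intro s; simp
  | cons x xs ih =>
    intro s
    simp only [List.foldl_cons]
    exact (ih (insD x s)).trans (((insD_perm x s).append_right xs).trans List.perm_middle.symm)

lemma foldl_insD_pairwise : ∀ (a s : List Int), s.Pairwise (fun a b => b ≤ a) →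
    (a.foldl (fun t i => insD i t) s).Pairwise (fun a b => b ≤ a) := by
  intro a
  induction a with
  | nil => intro s h; simpa using h
  | cons x xs ih =>
    intro s h
    simp only [List.foldl_cons]
    exact ih _ (insD_pairwise x s h)

lemma pyGetD_nat (m : List Int) (j : Nat) (h : j < m.length) :
    (PySem.List.pyGet? m (j : Int)).getD 0 = m[j] := by
  unfold PySem.List.pyGet? PySem.List.pyIdx?
  rw [if_pos (by omega : (0:Int) ≤ (j:Int)), if_pos (by exact_mod_cast h)]
  simp [List.getElem?_eq_getElem h]

lemma pyGetD_negIdx (m : List Int) (k : Nat) (h1 : 1 ≤ k) (h2 : k ≤ m.length) :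
    (PySem.List.pyGet? m (-(k : Int))).getD 0 = m[m.length - k]'(by omega) := by
  unfold PySem.List.pyGet? PySem.List.pyIdx?
  rw [if_neg (by omega), if_pos (by omega)]
  simp [List.getElem?_eq_getElem (show m.length - k < m.length by omega)]

lemma pySet_nat (m : List Int) (j : Nat) (h : j < m.length) (v : Int) :
    pySet m (j : Int) v = m.set j v := by
  unfold pySet PySem.List.pyIdx?
  rw [if_pos (by omega : (0:Int) ≤ (j:Int)), if_pos (by exact_mod_cast h)]
  simp

lemma pySet_negIdx (m : List Int) (k : Nat) (h1 : 1 ≤ k) (h2 : k ≤ m.length) (v : Int) :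
    pySet m (-(k : Int)) v = m.set (m.length - k) v := by
  unfold pySet PySem.List.pyIdx?
  rw [if_neg (by omega), if_pos (by omega)]
  simp

lemma drop_set_self (m : List Int) (p : Nat) (v : Int) (h : p < m.length) :
    (m.set p v).drop p = v :: m.drop (p + 1) := by
  induction m generalizing p with
  | nil => simp at h
  | cons x xs ih =>
    cases p with
    | zero => simp
    | succ q => simpa using ih q (by simpa using h)

lemma set_take_last (v : Int) : ∀ (m : List Int) (p : Nat), p < m.length →
    (m.take (p + 1)).set p v = m.take p ++ [v] := by
  intro m
  induction m with
  | nil => intro p h; simp at h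
  | cons x xs ih =>
    intro p h
    cases p with
    | zero => simp
    | succ q => simpa using ih q (by simpa using h)

-- the shift loop moves mx[j..n-2] one slot right (suffix of the loop, t steps remaining)
lemma shiftA_fold (n jn : Nat) (hj : jn < n) :
    ∀ (t : Nat) (m : List Int), m.length = n → t ≤ n - jn - 1 →
    (PySem.List.pyRange ((n : Int) - jn - t) ((n : Int) - jn)).foldl
        (fun m k => pySet m (-k) ((PySem.List.pyGet? m (-k - 1)).getD 0)) m
      = m.take (jn + 1) ++ (m.drop jn).take t ++ m.drop (jn + t + 1) := by
  intro t
  induction t with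
  | zero =>
    intro m hm _
    rw [show ((n : Int) - jn - ((0:Nat):Int)) = (n : Int) - jn by push_cast; ring]
    rw [PySem.List.pyRange_one_eq_nil (le_refl _)]
    simp [List.take_append_drop]
  | succ t ih =>
    intro m hm ht
    have hlt : (n:Int) - jn - ((t+1:Nat):Int) < (n:Int) - jn := by
      have : ((t+1:Nat):Int) = (t:Int) + 1 := by push_cast; ring
      omega
    rw [PySem.List.pyRange_one_cons hlt]
    simp only [List.foldl_cons]
    have e1 : -((n:Int) - jn - ((t+1:Nat):Int)) - 1 = -((n - jn - t : Nat) : Int) := by omega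
    have e2 : -((n:Int) - jn - ((t+1:Nat):Int)) = -((n - jn - t - 1 : Nat) : Int) := by omega
    rw [e1, e2, pyGetD_negIdx m (n - jn - t) (by omega) (by omega),
        pySet_negIdx m (n - jn - t - 1) (by omega) (by omega)]
    have hidx : m.length - (n - jn - t - 1) = jn + t + 1 := by omega
    have hidx2 : m.length - (n - jn - t) = jn + t := by omega
    simp only [hidx, hidx2]
    have e3 : (n:Int) - jn - ((t+1:Nat):Int) + 1 = (n:Int) - jn - (t:Nat) := by omega
    rw [e3]
    have hp : jn + t + 1 < m.length := by omega
    set v : Int := m[jn + t]'(by omega) with hv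
    rw [ih (m.set (jn + t + 1) v) (by simpa using hm) (by omega)]
    -- splice equality
    rw [List.take_set_of_le (by omega)]
    have mid : ((m.set (jn + t + 1) v).drop jn).take t = (m.drop jn).take t := by
      have d1 := List.drop_take (l := m.set (jn + t + 1) v) (i := jn) (j := jn + t)
      have d2 := List.drop_take (l := m) (i := jn) (j := jn + t)
      simp only [Nat.add_sub_cancel_left] at d1 d2
      rw [← d1, ← d2, List.take_set_of_le (by omega)]
    rw [mid, drop_set_self m (jn + t + 1) v hp]
    have tsucc : (m.drop jn).take (t + 1) = (m.drop jn).take t ++ [v] := by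
      rw [List.take_succ_eq_append_getElem (by simp; omega)]
      congr 1
      simp [hv, List.getElem_drop]
    rw [tsucc]
    simp [List.append_assoc]
    rfl

lemma scanA_spec (n : Nat) (i : Int) (_hn : 0 < n) :
    ∀ (t : Nat) (mx : List Int), mx.length = n → t ≤ n →
    scanA (n : Int) i mx (PySem.List.pyRange ((n : Int) - t) (n : Int))
      = (mx.take (n - t) ++ insD i (mx.drop (n - t))).take n := by
  intro t
  induction t with
  | zero =>
    intro mx hm _
    rw [show ((n : Int) - ((0:Nat):Int)) = (n : Int) by push_cast; ring]
    rw [PySem.List.pyRange_one_eq_nil (le_refl _)]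
    have h1 : mx.take (n - 0) = mx := by rw [← hm]; simp
    have h2 : mx.drop (n - 0) = [] := by rw [← hm]; simp
    simp only [scanA]
    rw [h1, h2]
    simp only [insD]
    exact (List.take_left' hm).symm
  | succ t ih =>
    intro mx hm ht
    set jn := n - t - 1 with hjn
    have hjlt : jn < n := by omega
    have hjm : jn < mx.length := by omega
    have hlt : (n:Int) - ((t+1:Nat):Int) < (n:Int) := by
      have : ((t+1:Nat):Int) = (t:Int) + 1 := by push_cast; ring
      omega
    rw [PySem.List.pyRange_one_cons hlt]
    have ej : ((n:Int) - ((t+1:Nat):Int)) = ((jn : Nat) : Int) := by omega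
    rw [ej]
    simp only [scanA]
    rw [pyGetD_nat mx jn hjm]
    have hnt1 : n - (t + 1) = jn := by omega
    rw [hnt1]
    have hdropj : mx.drop jn = mx[jn] :: mx.drop (jn + 1) := List.drop_eq_getElem_cons hjm
    split_ifs with hx
    · -- insertion at jn
      have hsh := shiftA_fold n jn hjlt t mx hm (by omega)
      have e1 : (n:Int) - (jn:Nat) - ((t:Nat):Int) = 1 := by omega
      rw [e1] at hsh
      unfold shiftA
      rw [hsh]
      have hdn : mx.drop (jn + t + 1) = [] := List.drop_eq_nil_of_le (by omega)
      rw [hdn]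
      simp only [List.append_nil]
      rw [pySet_nat _ jn (by simp; omega) i]
      rw [List.set_append_left jn i (by simp; omega)]
      rw [set_take_last i mx jn hjm]
      rw [hdropj]
      simp only [insD, if_pos hx]
      rw [List.take_append]
      have htt : (mx.take jn).take n = mx.take jn := by
        rw [List.take_take]; congr 1; omega
      rw [htt]
      have hlen3 : (mx.take jn).length = jn := by simp; omega
      rw [hlen3]
      have hnt2 : n - jn = t + 1 := by omega
      rw [hnt2]
      simp only [List.take_succ_cons]
      rw [← hdropj]
      simp [List.append_assoc]
    · -- recurse
      have e2 : ((jn : Nat) : Int) + 1 = ((n - t : Nat) : Int) := by omega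
      rw [e2]
      have ih' := ih mx hm (by omega)
      rw [show ((n:Int) - ((t:Nat):Int)) = ((n - t : Nat) : Int) by omega] at ih'
      rw [ih']
      have hnt : n - t = jn + 1 := by omega
      rw [hnt, hdropj]
      simp only [insD, if_neg hx]
      rw [List.take_succ_eq_append_getElem hjm, List.append_assoc, List.singleton_append]

lemma find_maxes_eq_take (a : List Int) (n : Nat) (hn : 0 < n) :
    find_maxes a ((n : Nat) : Int)
      = (a.foldl (fun t i => insD i t) (List.replicate n 0)).take n := by
  unfold find_maxes
  rw [PySem.List.pyRepeat_singleton]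
  rw [show ((n:Int)).toNat = n by omega]
  have hstep : ∀ (x : Int) (mx : List Int), mx.length = n →
      scanA ((n:Nat):Int) x mx (PySem.List.pyRange 0 ((n:Nat):Int)) = (insD x mx).take n := by
    intro x mx hm
    have hs := scanA_spec n x hn n mx hm (le_refl n)
    rw [sub_self] at hs
    simpa using hs
  have H : ∀ (a' : List Int) (mx : List Int), mx.length = n →
      a'.foldl (fun mx i => scanA ((n:Nat):Int) i mx (PySem.List.pyRange 0 ((n:Nat):Int))) mx
        = a'.foldl (fun mx i => (insD i mx).take n) mx := by
    intro a'
    induction a' with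
    | nil => intro mx hm; simp
    | cons x xs ih =>
      intro mx hm
      simp only [List.foldl_cons]
      rw [hstep x mx hm]
      exact ih _ (by simp [insD_length]; omega)
  rw [H a (List.replicate n 0) (by simp)]
  have hft := foldl_insD_take n a (List.replicate n 0) (by simp)
  simpa using hft

theorem find_maxes_spec_aux (a : List Int) (c : Int) :
    find_maxes a c = find_maxes_alt a c := by
  by_cases hc : 0 < c
  · have hcn : c = ((c.toNat : Nat) : Int) := by omega
    set n := c.toNat with hndef
    have hn0 : 0 < n := by omega
    rw [hcn, find_maxes_eq_take a n hn0]
    simp only [find_maxes_alt]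
    have hmax : max ((n:Nat):Int) 0 = ((n:Nat):Int) := by omega
    rw [hmax, PySem.List.pyRepeat_singleton,
        PySem.List.slice_to _ (show (0:Int) ≤ ((n:Nat):Int) by omega)]
    rw [show ((n:Int)).toNat = n by omega]
    congr 1
    have hperm : (a.foldl (fun t i => insD i t) (List.replicate n 0)).Perm
        (PySem.List.sorted (a ++ List.replicate n 0) (fun x => x) true) := by
      exact (foldl_insD_perm a (List.replicate n 0)).trans
        (List.perm_append_comm.trans (PySem.List.sorted_perm _ _ _).symm)
    exact List.Perm.eq_of_pairwise
      (fun a b _ _ h1 h2 => le_antisymm h2 h1)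
      (foldl_insD_pairwise a _ (by simp [List.pairwise_replicate]))
      (PySem.List.sorted_pairwise_rev _ _)
      hperm
  · have h1 : PySem.List.pyRepeat [(0:Int)] c = [] := by
      rw [PySem.List.pyRepeat_singleton]
      simp [Int.toNat_of_nonpos (by omega : c ≤ 0)]
    have h2 : PySem.List.pyRange 0 c = [] := PySem.List.pyRange_one_eq_nil (by omega)
    have h3 : max c 0 = 0 := by omega
    simp only [find_maxes, find_maxes_alt]
    rw [h3, h1, h2]
    rw [PySem.List.slice_to _ (le_refl (0:Int))]
    simp [scanA]

-- ===== VERDICT (by name: the statement is the Claim_ definition above) =====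
theorem find_maxes_spec : Claim_equal_find_maxes := by
  intro a c _
  unfold Spec_find_maxes
  exact find_maxes_spec_aux a c
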